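-- pv_equiv track=rewrite | github.com/soltnar/tabel | app/scheduler.py | _consecutive_span_with_day
-- ===== SOURCE A (Python) =====
-- def _consecutive_span_with_day(assigned_days: set[int], day: int) -> int:
--     days = set(assigned_days)
--     days.add(day)
--
--     left = day
--     while (left - 1) in days:
--         left -= 1
--
--     right = day
--     while (right + 1) in days:
--         right += 1
--
--     return right - left + 1
-- ===== SOURCE B (Python) =====
-- def _consecutive_span_with_day(assigned_days, day):
--     # Sort the distinct days, split them into maximal consecutive runs (kept as
--     # (lo, hi) bounds), and return the length of the run containing `day`.
--     days = sorted(set(assigned_days) | {day})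
--     runs = []
--     lo = hi = days[0]
--     for d in days[1:]:
--         if d == hi + 1:
--             hi = d
--         else:
--             runs.append((lo, hi))
--             lo = hi = d
--     runs.append((lo, hi))
--     for lo, hi in runs:
--         if lo <= day <= hi:
--             return hi - lo + 1
--     return 0  # unreachable: day is always in some run
-- ===== Notes on version B (the rewrite author's own statement) =====
-- stated objective: alternative
-- what changed: B sorts the distinct days, groups the sorted list into maximal consecutive runs kept as (lo, hi) bounds, and returns the length of the run containing `day`, instead of A's outward neighbour-probing from `day` via two while loops over set membership.
import Mathlib
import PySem

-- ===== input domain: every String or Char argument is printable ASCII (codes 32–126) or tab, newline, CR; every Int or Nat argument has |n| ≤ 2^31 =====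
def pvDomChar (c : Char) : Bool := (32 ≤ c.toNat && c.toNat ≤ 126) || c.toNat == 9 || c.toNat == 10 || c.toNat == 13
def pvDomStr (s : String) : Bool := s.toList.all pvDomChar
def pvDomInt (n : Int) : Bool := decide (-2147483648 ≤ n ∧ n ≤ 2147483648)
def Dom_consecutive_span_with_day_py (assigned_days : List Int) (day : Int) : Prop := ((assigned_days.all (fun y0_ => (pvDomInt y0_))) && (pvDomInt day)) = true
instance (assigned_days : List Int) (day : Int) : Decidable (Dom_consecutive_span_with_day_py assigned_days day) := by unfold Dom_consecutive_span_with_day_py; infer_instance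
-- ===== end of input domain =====

-- B replaces A's outward neighbour-probing (two while loops over set membership) by
-- sorting the distinct days, grouping them into maximal consecutive runs, and
-- returning the length of the run containing `day` (objective: alternative algorithm).

-- ===== PORT A =====
-- 'while (left - 1) in days: left -= 1'; fuel = days.length suffices: each
-- iteration steps to a further distinct member of `days` below the start.
def pvWalkDown (days : PySem.Set Int) : Nat → Int → Int
  | 0, l => l
  | n + 1, l => if PySem.Set.contains days (l - 1) then pvWalkDown days n (l - 1) else l

-- 'while (right + 1) in days: right += 1'
def pvWalkUp (days : PySem.Set Int) : Nat → Int → Int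
  | 0, r => r
  | n + 1, r => if PySem.Set.contains days (r + 1) then pvWalkUp days n (r + 1) else r

def consecutive_span_with_day_py (assigned_days : List Int) (day : Int) : Int :=
  let days : PySem.Set Int := PySem.Set.add (PySem.Set.ofList assigned_days) day
  let left := pvWalkDown days days.length day
  let right := pvWalkUp days days.length day
  right - left + 1

-- ===== PORT B =====
-- the grouping loop body: extend the current run (lo, hi) or flush it and start anew
def pvGroupStep (st : List (Int × Int) × Int × Int) (d : Int) : List (Int × Int) × Int × Int :=
  if d == st.2.2 + 1 then (st.1, st.2.1, d) else (st.1 ++ [(st.2.1, st.2.2)], d, d)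

def consecutive_span_with_day_py_alt (assigned_days : List Int) (day : Int) : Int :=
  let daysL : List Int :=
    PySem.List.sorted (PySem.Set.union (PySem.Set.ofList assigned_days) [day]) (fun x => x) false
  match daysL with
  | [] => 0   -- unreachable: daysL always contains day (Python days[0] never raises)
  | d0 :: restDays =>
    let st := restDays.foldl pvGroupStep ([], d0, d0)
    let runs := st.1 ++ [st.2]
    match runs.find? (fun p => decide (p.1 ≤ day ∧ day ≤ p.2)) with
    | some p => p.2 - p.1 + 1
    | none => 0   -- unreachable: day is always inside some run

-- ===== PRECONDITION & SPEC =====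
def Spec_consecutive_span_with_day_py (assigned_days : List Int) (day : Int) (out : Int) : Prop := out = consecutive_span_with_day_py_alt assigned_days day
instance (assigned_days : List Int) (day : Int) (out : Int) : Decidable (Spec_consecutive_span_with_day_py assigned_days day out) := by unfold Spec_consecutive_span_with_day_py; infer_instance

-- ===== CLAIM (what is proved, stated in full; the proofs are below) =====
def Claim_equal_consecutive_span_with_day_py : Prop := ∀ (assigned_days : List Int) (day : Int), Dom_consecutive_span_with_day_py assigned_days day → Spec_consecutive_span_with_day_py assigned_days day (consecutive_span_with_day_py assigned_days day)

-- ===== LEMMAS AND PROOFS =====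

-- counting elements below a bound drops strictly when the bound's predecessor is present
theorem pv_countP_lt {dl : List Int} {c : Int} (h : c ∈ dl) :
    dl.countP (fun x => decide (x < c)) < dl.countP (fun x => decide (x < c + 1)) := by
  induction dl with
  | nil => cases h
  | cons a t ih =>
    simp only [List.countP_cons]
    rcases List.mem_cons.mp h with rfl | ha
    · have hle : t.countP (fun x => decide (x < c)) ≤ t.countP (fun x => decide (x < c + 1)) :=
        List.countP_mono_left (by intro x hx hlt; simp only [decide_eq_true_eq] at *; omega)
      simp only [decide_eq_true_eq]
      split_ifs <;> omega
    · have := ih ha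
      have h2 : (if (decide (a < c)) = true then 1 else 0) ≤ (if (decide (a < c + 1)) = true then 1 else 0) := by
        simp only [decide_eq_true_eq]; split_ifs <;> omega
      omega

theorem pv_countP_gt {dl : List Int} {c : Int} (h : c ∈ dl) :
    dl.countP (fun x => decide (c < x)) < dl.countP (fun x => decide (c - 1 < x)) := by
  induction dl with
  | nil => cases h
  | cons a t ih =>
    simp only [List.countP_cons]
    rcases List.mem_cons.mp h with rfl | ha
    · have hle : t.countP (fun x => decide (c < x)) ≤ t.countP (fun x => decide (c - 1 < x)) :=
        List.countP_mono_left (by intro x hx hlt; simp only [decide_eq_true_eq] at *; omega)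
      simp only [decide_eq_true_eq]
      split_ifs <;> omega
    · have := ih ha
      have h2 : (if (decide (c < a)) = true then 1 else 0) ≤ (if (decide (c - 1 < a)) = true then 1 else 0) := by
        simp only [decide_eq_true_eq]; split_ifs <;> omega
      omega

-- the while loop 'while (left-1) in days: left -= 1' reaches the start of the gap-free stretch
theorem pvWalkDown_spec (days : List Int) : ∀ (fuel : Nat) (l : Int),
    days.countP (fun x => decide (x < l)) ≤ fuel →
    pvWalkDown days fuel l ≤ l ∧
    (∀ m, pvWalkDown days fuel l ≤ m → m < l → m ∈ days) ∧
    (pvWalkDown days fuel l - 1) ∉ days := by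
  intro fuel
  induction fuel with
  | zero =>
    intro l hc
    have hz : days.countP (fun x => decide (x < l)) = 0 := Nat.le_zero.mp hc
    have hnone : ∀ x ∈ days, ¬ (x < l) := by
      intro x hx hlt
      have := List.countP_eq_zero.mp hz x hx
      simp [hlt] at this
    have h0 : pvWalkDown days 0 l = l := rfl
    rw [h0]
    refine ⟨le_refl _, ?_, ?_⟩
    · intro m h1 h2; omega
    · intro hmem
      exact hnone _ hmem (by omega)
  | succ n ih =>
    intro l hc
    by_cases hm : PySem.Set.contains days (l - 1) = true
    · have hmem : (l - 1) ∈ days := (PySem.Set.contains_iff _ _).mp hm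
      have hlt : days.countP (fun x => decide (x < l - 1)) < days.countP (fun x => decide (x < l)) := by
        have := pv_countP_lt hmem
        simpa [sub_add_cancel] using this
      have hrec := ih (l - 1) (by omega)
      have heq : pvWalkDown days (n + 1) l = pvWalkDown days n (l - 1) := by
        show (if PySem.Set.contains days (l - 1) then pvWalkDown days n (l - 1) else l) = _
        rw [if_pos hm]
      rw [heq]
      refine ⟨by omega, ?_, hrec.2.2⟩
      intro m h1 h2
      rcases lt_or_ge m (l - 1) with h | h
      · exact hrec.2.1 m h1 h
      · have : m = l - 1 := by omega
        exact this ▸ hmem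
    · have heq : pvWalkDown days (n + 1) l = l := by
        show (if PySem.Set.contains days (l - 1) then pvWalkDown days n (l - 1) else l) = _
        rw [if_neg hm]
      rw [heq]
      refine ⟨le_refl _, ?_, ?_⟩
      · intro m h1 h2; omega
      · intro hmemb
        exact hm ((PySem.Set.contains_iff _ _).mpr hmemb)

theorem pvWalkUp_spec (days : List Int) : ∀ (fuel : Nat) (r : Int),
    days.countP (fun x => decide (r < x)) ≤ fuel →
    r ≤ pvWalkUp days fuel r ∧
    (∀ m, r < m → m ≤ pvWalkUp days fuel r → m ∈ days) ∧
    (pvWalkUp days fuel r + 1) ∉ days := by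
  intro fuel
  induction fuel with
  | zero =>
    intro r hc
    have hz : days.countP (fun x => decide (r < x)) = 0 := Nat.le_zero.mp hc
    have hnone : ∀ x ∈ days, ¬ (r < x) := by
      intro x hx hlt
      have := List.countP_eq_zero.mp hz x hx
      simp [hlt] at this
    have h0 : pvWalkUp days 0 r = r := rfl
    rw [h0]
    refine ⟨le_refl _, ?_, ?_⟩
    · intro m h1 h2; omega
    · intro hmem
      exact hnone _ hmem (by omega)
  | succ n ih =>
    intro r hc
    by_cases hm : PySem.Set.contains days (r + 1) = true
    · have hmem : (r + 1) ∈ days := (PySem.Set.contains_iff _ _).mp hm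
      have hlt : days.countP (fun x => decide (r + 1 < x)) < days.countP (fun x => decide (r < x)) := by
        have := pv_countP_gt hmem
        simpa [add_sub_cancel_right] using this
      have hrec := ih (r + 1) (by omega)
      have heq : pvWalkUp days (n + 1) r = pvWalkUp days n (r + 1) := by
        show (if PySem.Set.contains days (r + 1) then pvWalkUp days n (r + 1) else r) = _
        rw [if_pos hm]
      rw [heq]
      refine ⟨by omega, ?_, hrec.2.2⟩
      intro m h1 h2
      rcases lt_or_ge (r + 1) m with h | h
      · exact hrec.2.1 m h h2
      · have : m = r + 1 := by omega
        exact this ▸ hmem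
    · have heq : pvWalkUp days (n + 1) r = r := by
        show (if PySem.Set.contains days (r + 1) then pvWalkUp days n (r + 1) else r) = _
        rw [if_neg hm]
      rw [heq]
      refine ⟨le_refl _, ?_, ?_⟩
      · intro m h1 h2; omega
      · intro hmemb
        exact hm ((PySem.Set.contains_iff _ _).mpr hmemb)

-- recursive form of the grouping loop (proof helper)
def pvCollect (lo hi : Int) : List Int → List (Int × Int)
  | [] => [(lo, hi)]
  | d :: L' => if d = hi + 1 then pvCollect lo d L' else (lo, hi) :: pvCollect d d L'

theorem pvFold_eq : ∀ (L : List Int) (runs : List (Int × Int)) (lo hi : Int),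
    (L.foldl pvGroupStep (runs, lo, hi)).1 ++ [(L.foldl pvGroupStep (runs, lo, hi)).2] =
      runs ++ pvCollect lo hi L := by
  intro L
  induction L with
  | nil => intro runs lo hi; rfl
  | cons d L' ih =>
    intro runs lo hi
    rw [List.foldl_cons]
    by_cases h : d = hi + 1
    · have hstep : pvGroupStep (runs, lo, hi) d = (runs, lo, d) := by
        simp [pvGroupStep, h]
      rw [hstep, ih]
      have hc : pvCollect lo hi (d :: L') = pvCollect lo d L' := by
        show (if d = hi + 1 then pvCollect lo d L' else (lo, hi) :: pvCollect d d L') = _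
        rw [if_pos h]
      rw [hc]
    · have hstep : pvGroupStep (runs, lo, hi) d = (runs ++ [(lo, hi)], d, d) := by
        simp [pvGroupStep, h]
      rw [hstep, ih]
      have hc : pvCollect lo hi (d :: L') = (lo, hi) :: pvCollect d d L' := by
        show (if d = hi + 1 then pvCollect lo d L' else (lo, hi) :: pvCollect d d L') = _
        rw [if_neg h]
      rw [hc, List.append_assoc]
      rfl

-- each produced pair is a maximal gap-free interval of the covered values,
-- and every covered value lies in some produced pair
theorem pvCollect_spec : ∀ (L : List Int) (lo hi : Int), L.Pairwise (· < ·) →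
    (∀ y ∈ L, hi < y) → lo ≤ hi →
    (∀ p ∈ pvCollect lo hi L,
       lo ≤ p.1 ∧ p.1 ≤ p.2 ∧
       (∀ x, p.1 ≤ x → x ≤ p.2 → ((lo ≤ x ∧ x ≤ hi) ∨ x ∈ L)) ∧
       ¬((lo ≤ p.1 - 1 ∧ p.1 - 1 ≤ hi) ∨ (p.1 - 1) ∈ L) ∧
       ¬((lo ≤ p.2 + 1 ∧ p.2 + 1 ≤ hi) ∨ (p.2 + 1) ∈ L)) ∧
    (∀ x, ((lo ≤ x ∧ x ≤ hi) ∨ x ∈ L) → ∃ p ∈ pvCollect lo hi L, p.1 ≤ x ∧ x ≤ p.2) := by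
  intro L
  induction L with
  | nil =>
    intro lo hi _ _ hlohi
    constructor
    · intro p hp
      have hp' : p = (lo, hi) := by simpa [pvCollect] using hp
      subst hp'
      refine ⟨le_refl _, hlohi, ?_, ?_, ?_⟩
      · intro x h1 h2; exact Or.inl ⟨h1, h2⟩
      · simp
      · simp
    · intro x hx
      refine ⟨(lo, hi), by simp [pvCollect], ?_, ?_⟩ <;> (simp at hx ⊢; omega)
  | cons d L' ih =>
    intro lo hi hL hgt hlohi
    rw [List.pairwise_cons] at hL
    obtain ⟨hd, hL'⟩ := hL
    have hhid : hi < d := hgt d (by simp)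
    have hgt' : ∀ y ∈ L', hi < y := fun y hy => hgt y (by simp [hy])
    by_cases h : d = hi + 1
    · have hc : pvCollect lo hi (d :: L') = pvCollect lo d L' := by
        show (if d = hi + 1 then pvCollect lo d L' else (lo, hi) :: pvCollect d d L') = _
        rw [if_pos h]
      rw [hc]
      obtain ⟨ihp, ihc⟩ := ih lo d hL' hd (by omega)
      constructor
      · intro p hp
        obtain ⟨h1, h2, h3, h4, h5⟩ := ihp p hp
        refine ⟨h1, h2, ?_, ?_, ?_⟩
        · intro x hx1 hx2
          rcases h3 x hx1 hx2 with h' | h'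
          · rcases lt_or_ge hi x with hcase | hcase
            · have : x = d := by omega
              simp [this]
            · exact Or.inl ⟨h'.1, hcase⟩
          · simp [h']
        · intro hcon
          refine h4 ?_
          rcases hcon with h' | h'
          · exact Or.inl ⟨h'.1, by omega⟩
          · rcases List.mem_cons.mp h' with h'' | h''
            · exact Or.inl (by omega)
            · exact Or.inr h''
        · intro hcon
          refine h5 ?_
          rcases hcon with h' | h'
          · exact Or.inl ⟨h'.1, by omega⟩
          · rcases List.mem_cons.mp h' with h'' | h''
            · exact Or.inl (by omega)
            · exact Or.inr h''
      · intro x hx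
        refine ihc x ?_
        rcases hx with h' | h'
        · exact Or.inl ⟨h'.1, by omega⟩
        · rcases List.mem_cons.mp h' with h'' | h''
          · exact Or.inl (by omega)
          · exact Or.inr h''
    · have hd2 : hi + 2 ≤ d := by omega
      have hc : pvCollect lo hi (d :: L') = (lo, hi) :: pvCollect d d L' := by
        show (if d = hi + 1 then pvCollect lo d L' else (lo, hi) :: pvCollect d d L') = _
        rw [if_neg h]
      rw [hc]
      obtain ⟨ihp, ihc⟩ := ih d d hL' hd (le_refl _)
      constructor
      · intro p hp
        rcases List.mem_cons.mp hp with rfl | hp'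
        · refine ⟨le_refl _, hlohi, ?_, ?_, ?_⟩
          · intro x hx1 hx2; exact Or.inl ⟨hx1, hx2⟩
          · rintro (h' | h')
            · omega
            · rcases List.mem_cons.mp h' with h'' | h''
              · omega
              · have := hgt' _ h''; omega
          · rintro (h' | h')
            · omega
            · rcases List.mem_cons.mp h' with h'' | h''
              · omega
              · have := hd _ h''; omega
        · obtain ⟨h1, h2, h3, h4, h5⟩ := ihp p hp'
          refine ⟨by omega, h2, ?_, ?_, ?_⟩
          · intro x hx1 hx2
            rcases h3 x hx1 hx2 with h' | h'
            · have : x = d := by omega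
              simp [this]
            · simp [h']
          · rintro (h' | h')
            · omega
            · rcases List.mem_cons.mp h' with h'' | h''
              · exact h4 (Or.inl (by omega))
              · exact h4 (Or.inr h'')
          · rintro (h' | h')
            · omega
            · rcases List.mem_cons.mp h' with h'' | h''
              · exact h5 (Or.inl (by omega))
              · exact h5 (Or.inr h'')
      · intro x hx
        rcases hx with h' | h'
        · exact ⟨(lo, hi), by simp, h'.1, h'.2⟩
        · rcases List.mem_cons.mp h' with h'' | h''
          · obtain ⟨p, hp, hx1, hx2⟩ := ihc x (Or.inl (by omega))
            exact ⟨p, by simp [hp], hx1, hx2⟩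
          · obtain ⟨p, hp, hx1, hx2⟩ := ihc x (Or.inr h'')
            exact ⟨p, by simp [hp], hx1, hx2⟩

-- ===== VERDICT (by name: the statement is the Claim_ definition above) =====
theorem consecutive_span_with_day_py_spec : Claim_equal_consecutive_span_with_day_py := by
  intro assigned_days day _
  unfold Spec_consecutive_span_with_day_py
  set dl : List Int := PySem.Set.add (PySem.Set.ofList assigned_days) day with hdldef
  set U : List Int := PySem.Set.union (PySem.Set.ofList assigned_days) [day] with hUdef
  set L : List Int := PySem.List.sorted U (fun x => x) false with hLdef
  have hbridge : ∀ x : Int, x ∈ L ↔ x ∈ dl := by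
    intro x
    rw [hLdef, PySem.List.mem_sorted, hUdef, hdldef]
    simp [PySem.Set.mem_union, PySem.Set.mem_add, PySem.Set.mem_ofList]
  have hnodupU : U.Nodup := by
    rw [hUdef]; exact PySem.Set.nodup_union _ _ (PySem.Set.nodup_ofList _)
  have hnodupL : L.Nodup := by
    rw [hLdef]; exact ((PySem.List.sorted_perm _ _ _).nodup_iff).mpr hnodupU
  have hle : L.Pairwise (· ≤ ·) := by
    rw [hLdef]; exact PySem.List.sorted_pairwise _ _
  have hLlt : L.Pairwise (· < ·) := by
    have := hle.and hnodupL
    exact this.imp (fun h => lt_of_le_of_ne h.1 h.2)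
  have hdayL : day ∈ L := (hbridge day).mpr (by rw [hdldef]; simp [PySem.Set.mem_add])
  obtain ⟨d0, restDays, hLform⟩ : ∃ d0 restDays, L = d0 :: restDays := by
    cases hLc : L with
    | nil => rw [hLc] at hdayL; cases hdayL
    | cons d0 restDays => exact ⟨d0, restDays, rfl⟩
  rw [hLform] at hbridge hdayL hLlt
  rw [List.pairwise_cons] at hLlt
  obtain ⟨hd0, hrest⟩ := hLlt
  -- the grouping fold equals its recursive form
  have hfold := pvFold_eq restDays [] d0 d0
  rw [List.nil_append] at hfold
  set runs : List (Int × Int) := pvCollect d0 d0 restDays with hrunsdef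
  have hB : consecutive_span_with_day_py_alt assigned_days day =
      (match runs.find? (fun p => decide (p.1 ≤ day ∧ day ≤ p.2)) with
       | some p => p.2 - p.1 + 1
       | none => 0) := by
    have h1 : consecutive_span_with_day_py_alt assigned_days day =
        (match (PySem.List.sorted U (fun x => x) false : List Int) with
         | [] => (0 : Int)
         | d0' :: rest' =>
           match ((rest'.foldl pvGroupStep ([], d0', d0')).1 ++
               [(rest'.foldl pvGroupStep ([], d0', d0')).2]).find?
               (fun p => decide (p.1 ≤ day ∧ day ≤ p.2)) with
           | some p => p.2 - p.1 + 1
           | none => 0) := rfl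
    rw [h1, ← hLdef, hLform]
    show (match ((restDays.foldl pvGroupStep ([], d0, d0)).1 ++
        [(restDays.foldl pvGroupStep ([], d0, d0)).2]).find?
        (fun p => decide (p.1 ≤ day ∧ day ≤ p.2)) with
       | some p => p.2 - p.1 + 1
       | none => 0) = _
    rw [hfold]
  -- covered values = members of dl
  have hcov : ∀ x : Int, ((d0 ≤ x ∧ x ≤ d0) ∨ x ∈ restDays) ↔ x ∈ dl := by
    intro x
    rw [← hbridge x, List.mem_cons]
    constructor
    · rintro (h' | h')
      · exact Or.inl (by omega)
      · exact Or.inr h'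
    · rintro (rfl | h')
      · exact Or.inl ⟨le_refl _, le_refl _⟩
      · exact Or.inr h'
  obtain ⟨hpairs, hcover⟩ := pvCollect_spec restDays d0 d0 hrest hd0 (le_refl _)
  -- A's two walks
  obtain ⟨hw1, hw2, hw3⟩ := pvWalkDown_spec dl dl.length day (List.countP_le_length ..)
  obtain ⟨hu1, hu2, hu3⟩ := pvWalkUp_spec dl dl.length day (List.countP_le_length ..)
  -- the pair found by B
  have hdaydl : day ∈ dl := (hbridge day).mp hdayL
  obtain ⟨p0, hp0, hp0x⟩ := hcover day ((hcov day).mpr hdaydl)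
  cases hfind : runs.find? (fun p => decide (p.1 ≤ day ∧ day ≤ p.2)) with
  | none =>
    exfalso
    have := List.find?_eq_none.mp hfind p0 hp0
    simp only [decide_eq_true_eq] at this
    exact this hp0x
  | some p =>
    have hpR : p ∈ runs := List.mem_of_find?_eq_some hfind
    have hpx : p.1 ≤ day ∧ day ≤ p.2 := by
      have := List.find?_some hfind
      simpa using this
    obtain ⟨_, hp12, hint, hbl, hbr⟩ := hpairs p hpR
    have hintdl : ∀ x, p.1 ≤ x → x ≤ p.2 → x ∈ dl :=
      fun x h1 h2 => (hcov x).mp (hint x h1 h2)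
    have hbldl : (p.1 - 1) ∉ dl := fun hmem => hbl ((hcov _).mpr hmem)
    have hbrdl : (p.2 + 1) ∉ dl := fun hmem => hbr ((hcov _).mpr hmem)
    have hwl : pvWalkDown dl dl.length day = p.1 := by
      rcases lt_trichotomy (pvWalkDown dl dl.length day) p.1 with hcase | hcase | hcase
      · exact absurd (hw2 (p.1 - 1) (by omega) (by omega)) hbldl
      · exact hcase
      · exact absurd (hintdl (pvWalkDown dl dl.length day - 1) (by omega) (by omega)) hw3
    have hwr : pvWalkUp dl dl.length day = p.2 := by
      rcases lt_trichotomy (pvWalkUp dl dl.length day) p.2 with hcase | hcase | hcase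
      · exact absurd (hintdl (pvWalkUp dl dl.length day + 1) (by omega) (by omega)) hu3
      · exact hcase
      · exact absurd (hu2 (p.2 + 1) (by omega) (by omega)) hbrdl
    have hA : consecutive_span_with_day_py assigned_days day =
        pvWalkUp dl dl.length day - pvWalkDown dl dl.length day + 1 := rfl
    rw [hA, hwl, hwr, hB, hfind]
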